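-- pv_equiv track=rewrite | github.com/bunkerity/bunkerweb | src/ui/app/models/instance.py | _calculate_pane_counts
-- ===== SOURCE A (Python) =====
-- from typing import Any, List, Literal, Optional, Tuple, Union
--
-- def _calculate_pane_counts(all_reports: List[dict], filtered_reports: List[dict]) -> dict:
--     """Calculate search panes counts"""
--     pane_counts = {}
--     filtered_ids = {r.get("id") for r in filtered_reports}
--
--     pane_fields = ["ip", "country", "method", "url", "status", "reason", "server_name", "security_mode"]
--
--     for field in pane_fields:
--         pane_counts[field] = {}
--
--     for report in all_reports:
--         for field in pane_fields:
--             value = str(report.get(field, "N/A"))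
--             if value not in pane_counts[field]:
--                 pane_counts[field][value] = {"total": 0, "count": 0}
--             pane_counts[field][value]["total"] += 1
--             if report.get("id") in filtered_ids:
--                 pane_counts[field][value]["count"] += 1
--
--     return pane_counts
-- ===== SOURCE B (Python) =====
-- from collections import Counter
-- from typing import List
--
--
-- def _calculate_pane_counts(all_reports: List[dict], filtered_reports: List[dict]) -> dict:
--     """Calculate search panes counts (two frequency passes per field, then a merge)."""
--     filtered_ids = {r.get("id") for r in filtered_reports}
--
--     pane_fields = ["ip", "country", "method", "url", "status", "reason", "server_name", "security_mode"]
--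
--     pane_counts = {}
--     for field in pane_fields:
--         totals = Counter(str(r.get(field, "N/A")) for r in all_reports)
--         counts = Counter(
--             str(r.get(field, "N/A"))
--             for r in all_reports
--             if r.get("id") in filtered_ids
--         )
--         pane_counts[field] = {
--             value: {"total": total, "count": counts.get(value, 0)}
--             for value, total in totals.items()
--         }
--     return pane_counts
-- ===== Notes on version B (the rewrite author's own statement) =====
-- stated objective: idiomatic
-- what changed: Replaces A's single interleaved pass (one loop over reports nested over fields, mutating nested count records in place) by, per field, two Counter frequency passes -- totals over all reports and counts over the id-filtered reports -- merged into the result via a dict comprehension keyed by totals' insertion order.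
import Mathlib
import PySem

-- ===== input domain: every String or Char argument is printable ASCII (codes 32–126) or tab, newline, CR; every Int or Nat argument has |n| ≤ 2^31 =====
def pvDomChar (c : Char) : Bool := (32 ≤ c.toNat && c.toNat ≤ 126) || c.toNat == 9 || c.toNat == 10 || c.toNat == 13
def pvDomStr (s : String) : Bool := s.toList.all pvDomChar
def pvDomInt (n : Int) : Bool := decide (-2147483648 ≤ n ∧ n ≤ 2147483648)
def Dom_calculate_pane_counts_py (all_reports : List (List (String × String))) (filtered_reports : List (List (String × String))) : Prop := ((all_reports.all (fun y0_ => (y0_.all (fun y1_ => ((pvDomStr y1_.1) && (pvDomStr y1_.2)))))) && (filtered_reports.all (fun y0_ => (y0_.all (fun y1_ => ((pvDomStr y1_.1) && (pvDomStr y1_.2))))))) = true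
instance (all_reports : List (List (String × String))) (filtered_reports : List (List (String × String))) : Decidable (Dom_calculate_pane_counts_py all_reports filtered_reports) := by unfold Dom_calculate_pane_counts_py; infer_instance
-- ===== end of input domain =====

-- B replaces A's single interleaved reports×fields accumulation by two per-field Counter
-- frequency passes merged into the result (objective: idiomatic; same asymptotic cost).

-- ===== PORT A =====
-- the fixed pane field list (shared by both Pythons verbatim)
def pvPaneFields : List String := ["ip", "country", "method", "url", "status", "reason", "server_name", "security_mode"]

-- {r.get("id") for r in filtered_reports}  (shared by both Pythons verbatim)
def pvFilteredIds (filtered_reports : List (List (String × String))) : PySem.Set (Option String) :=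
  PySem.Set.ofList (filtered_reports.map (fun r => (PySem.Dict.mk r).get? "id"))

-- the body of A's inner `for field in pane_fields` loop (one report, one field)
def pvStepA (filtered_ids : PySem.Set (Option String)) (f : String)
    (inner : PySem.Dict String (PySem.Dict String Int)) (report : List (String × String)) :
    PySem.Dict String (PySem.Dict String Int) :=
  let value := (PySem.Dict.mk report).getD f "N/A"
  let inner := if !inner.contains value then
      inner.insert value (PySem.Dict.ofList [("total", 0), ("count", 0)])
    else inner
  let inner := inner.modify value PySem.Dict.empty (fun e => e.modify "total" 0 (· + 1))
  if PySem.Set.contains filtered_ids ((PySem.Dict.mk report).get? "id") then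
    inner.modify value PySem.Dict.empty (fun e => e.modify "count" 0 (· + 1))
  else inner

def calculate_pane_counts_py (all_reports : List (List (String × String))) (filtered_reports : List (List (String × String))) : List (String × List (String × List (String × Int))) :=
  let filtered_ids := pvFilteredIds filtered_reports
  let pane_counts := pvPaneFields.foldl (fun pc f => pc.insert f PySem.Dict.empty)
    (PySem.Dict.empty : PySem.Dict String (PySem.Dict String (PySem.Dict String Int)))
  let pane_counts := all_reports.foldl (fun pc report =>
    pvPaneFields.foldl (fun pc f =>
      pc.insert f (pvStepA filtered_ids f (pc.getD f PySem.Dict.empty) report)) pc) pane_counts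
  pane_counts.items.map (fun p => (p.1, p.2.items.map (fun q => (q.1, q.2.items))))

-- ===== PORT B =====
def calculate_pane_counts_py_alt (all_reports : List (List (String × String))) (filtered_reports : List (List (String × String))) : List (String × List (String × List (String × Int))) :=
  let filtered_ids := pvFilteredIds filtered_reports
  pvPaneFields.map (fun f =>
    let totals := PySem.Dict.counter (all_reports.map (fun r => (PySem.Dict.mk r).getD f "N/A"))
    let counts := PySem.Dict.counter ((all_reports.filter (fun r =>
        PySem.Set.contains filtered_ids ((PySem.Dict.mk r).get? "id"))).map
      (fun r => (PySem.Dict.mk r).getD f "N/A"))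
    (f, totals.items.map (fun p => (p.1, [("total", p.2), ("count", counts.getD p.1 0)]))))

-- ===== PRECONDITION & SPEC =====
def Spec_calculate_pane_counts_py (all_reports : List (List (String × String))) (filtered_reports : List (List (String × String))) (out : List (String × List (String × List (String × Int)))) : Prop := out = calculate_pane_counts_py_alt all_reports filtered_reports
instance (all_reports : List (List (String × String))) (filtered_reports : List (List (String × String))) (out : List (String × List (String × List (String × Int)))) : Decidable (Spec_calculate_pane_counts_py all_reports filtered_reports out) := by unfold Spec_calculate_pane_counts_py; infer_instance

-- ===== CLAIM (what is proved, stated in full; the proofs are below) =====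
def Claim_equal_calculate_pane_counts_py : Prop := ∀ (all_reports : List (List (String × String))) (filtered_reports : List (List (String × String))), Dom_calculate_pane_counts_py all_reports filtered_reports → Spec_calculate_pane_counts_py all_reports filtered_reports (calculate_pane_counts_py all_reports filtered_reports)

-- ===== LEMMAS AND PROOFS =====

-- proof-side abbreviations
def pvKeyOf (f : String) (r : List (String × String)) : String := (PySem.Dict.mk r).getD f "N/A"
def pvInF (ids : PySem.Set (Option String)) (r : List (String × String)) : Bool :=
  PySem.Set.contains ids ((PySem.Dict.mk r).get? "id")
def pvEntry (t c : Int) : PySem.Dict String Int := PySem.Dict.mk [("total", t), ("count", c)]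
def pvKa (f : String) (rs : List (List (String × String))) : List String := rs.map (pvKeyOf f)
def pvKf (ids : PySem.Set (Option String)) (f : String) (rs : List (List (String × String))) : List String :=
  (rs.filter (pvInF ids)).map (pvKeyOf f)
def pvInnerA (ids : PySem.Set (Option String)) (f : String) (rs : List (List (String × String))) :
    PySem.Dict String (PySem.Dict String Int) :=
  rs.foldl (fun inner r => pvStepA ids f inner r) PySem.Dict.empty
-- the common canonical per-field pane: value ↦ {"total": multiplicity in all, "count": multiplicity in filtered}
def pvCanon (ids : PySem.Set (Option String)) (rs : List (List (String × String))) (f : String) :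
    List (String × List (String × Int)) :=
  (PySem.Set.ofList (pvKa f rs)).map (fun v =>
    (v, [("total", (((pvKa f rs).count v : Nat) : Int)), ("count", (((pvKf ids f rs).count v : Nat) : Int))]))

theorem pvEntry_modify_total (t c : Int) :
    (pvEntry t c).modify "total" 0 (· + 1) = pvEntry (t + 1) c := by
  simp [pvEntry, PySem.Dict.modify, PySem.Dict.insert, PySem.Dict.getD, PySem.Dict.get?]

theorem pvEntry_modify_count (t c : Int) :
    (pvEntry t c).modify "count" 0 (· + 1) = pvEntry t (c + 1) := by
  simp [pvEntry, PySem.Dict.modify, PySem.Dict.insert, PySem.Dict.getD, PySem.Dict.get?]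

theorem pvE00 : (PySem.Dict.ofList [("total", 0), ("count", 0)] : PySem.Dict String Int) = pvEntry 0 0 := by
  simp [pvEntry, PySem.Dict.ofList, PySem.Dict.update, PySem.Dict.insert, PySem.Dict.empty]

theorem pvOfList_append (xs : List String) (x : String) :
    PySem.Set.ofList (xs ++ [x]) = PySem.Set.add (PySem.Set.ofList xs) x := by
  rw [PySem.Set.ofList_eq_foldl, PySem.Set.ofList_eq_foldl, List.foldl_append]
  rfl

theorem pvOfList_append_mem {xs : List String} {x : String} (h : x ∈ xs) :
    PySem.Set.ofList (xs ++ [x]) = PySem.Set.ofList xs := by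
  rw [pvOfList_append]
  have h' : x ∈ PySem.Set.ofList xs := (PySem.Set.mem_ofList xs x).2 h
  simp [PySem.Set.add, h']

theorem pvOfList_append_not_mem {xs : List String} {x : String} (h : ¬ x ∈ xs) :
    PySem.Set.ofList (xs ++ [x]) = PySem.Set.ofList xs ++ [x] := by
  rw [pvOfList_append]
  have h' : ¬ x ∈ PySem.Set.ofList xs := fun hx => h ((PySem.Set.mem_ofList xs x).1 hx)
  simp [PySem.Set.add, h']

theorem pvKf_subset (ids : PySem.Set (Option String)) (f : String) (rs : List (List (String × String)))
    {v : String} (h : v ∈ pvKf ids f rs) : v ∈ pvKa f rs := by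
  simp only [pvKf, pvKa, List.mem_map] at h ⊢
  obtain ⟨r, hr, rfl⟩ := h
  exact ⟨r, List.mem_of_mem_filter hr, rfl⟩

theorem pvKeys_modify_of_contains (d : PySem.Dict String (PySem.Dict String Int)) {k : String}
    (d0 : PySem.Dict String Int) (g : PySem.Dict String Int → PySem.Dict String Int)
    (hc : d.contains k = true) : (d.modify k d0 g).keys = d.keys := by
  rw [PySem.Dict.keys_modify, PySem.Dict.keys_insert_of_contains _ _ hc]

theorem pvContains_modify_self (d : PySem.Dict String (PySem.Dict String Int)) (k : String)
    (d0 : PySem.Dict String Int) (g : PySem.Dict String Int → PySem.Dict String Int) :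
    (d.modify k d0 g).contains k = true := by
  rw [PySem.Dict.modify, PySem.Dict.contains_insert_self]

-- A's step, re-expressed on one inner pane (d = the pane, k = the report's value, p = id-filtered?)
def pvStepCore (d : PySem.Dict String (PySem.Dict String Int)) (k : String) (p : Bool) :
    PySem.Dict String (PySem.Dict String Int) :=
  let d1 := if !d.contains k then d.insert k (pvEntry 0 0) else d
  let d2 := d1.modify k PySem.Dict.empty (fun e => e.modify "total" 0 (· + 1))
  if p then d2.modify k PySem.Dict.empty (fun e => e.modify "count" 0 (· + 1)) else d2

theorem pvStepCore_keys_of_contains (d : PySem.Dict String (PySem.Dict String Int)) (k : String) (p : Bool)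
    (hc : d.contains k = true) : (pvStepCore d k p).keys = d.keys := by
  unfold pvStepCore
  have h1 : (if !d.contains k then d.insert k (pvEntry 0 0) else d) = d := by rw [hc]; simp
  rw [h1]
  cases p
  · rw [if_neg Bool.false_ne_true, pvKeys_modify_of_contains _ _ _ hc]
  · rw [if_pos rfl, pvKeys_modify_of_contains _ _ _ (pvContains_modify_self _ _ _ _),
        pvKeys_modify_of_contains _ _ _ hc]

theorem pvStepCore_keys_of_not_contains (d : PySem.Dict String (PySem.Dict String Int)) (k : String) (p : Bool)
    (hc : d.contains k = false) : (pvStepCore d k p).keys = d.keys ++ [k] := by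
  unfold pvStepCore
  have h1 : (if !d.contains k then d.insert k (pvEntry 0 0) else d) = d.insert k (pvEntry 0 0) := by
    rw [hc]; simp
  rw [h1]
  have hc1 : (d.insert k (pvEntry 0 0)).contains k = true := by
    rw [PySem.Dict.contains_insert_self]
  cases p
  · rw [if_neg Bool.false_ne_true, pvKeys_modify_of_contains _ _ _ hc1,
        PySem.Dict.keys_insert_of_not_contains _ _ hc]
  · rw [if_pos rfl, pvKeys_modify_of_contains _ _ _ (pvContains_modify_self _ _ _ _),
        pvKeys_modify_of_contains _ _ _ hc1, PySem.Dict.keys_insert_of_not_contains _ _ hc]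

-- the per-field invariant of A's accumulation
theorem pvInnerA_inv (ids : PySem.Set (Option String)) (f : String) (rs : List (List (String × String))) :
    (pvInnerA ids f rs).keys = PySem.Set.ofList (pvKa f rs) ∧
    ∀ v, (pvInnerA ids f rs).getD v PySem.Dict.empty =
      if v ∈ pvKa f rs then pvEntry (((pvKa f rs).count v : Nat) : Int) (((pvKf ids f rs).count v : Nat) : Int)
      else PySem.Dict.empty := by
  induction rs using List.reverseRecOn with
  | nil =>
    refine ⟨rfl, fun v => ?_⟩
    simp [pvInnerA, pvKa]
  | append_singleton rs r ih =>
    obtain ⟨ihk, ihg⟩ := ih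
    have hka : pvKa f (rs ++ [r]) = pvKa f rs ++ [pvKeyOf f r] := by simp [pvKa]
    have hkf : pvKf ids f (rs ++ [r]) =
        pvKf ids f rs ++ (if pvInF ids r then [pvKeyOf f r] else []) := by
      by_cases hp : pvInF ids r <;> simp [pvKf, List.filter_append, hp, pvKeyOf]
    have hfold : pvInnerA ids f (rs ++ [r]) = pvStepA ids f (pvInnerA ids f rs) r := by
      simp [pvInnerA, List.foldl_append]
    have hcont : (pvInnerA ids f rs).contains (pvKeyOf f r) = decide (pvKeyOf f r ∈ pvKa f rs) := by
      rw [PySem.Dict.contains_eq_decide_mem_keys, ihk]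
      simp [PySem.Set.mem_ofList]
    have hstep : pvStepA ids f (pvInnerA ids f rs) r =
        (let d1 := if !(pvInnerA ids f rs).contains (pvKeyOf f r) then
            (pvInnerA ids f rs).insert (pvKeyOf f r) (pvEntry 0 0)
          else pvInnerA ids f rs
         let d2 := d1.modify (pvKeyOf f r) PySem.Dict.empty (fun e => e.modify "total" 0 (· + 1))
         if pvInF ids r then d2.modify (pvKeyOf f r) PySem.Dict.empty (fun e => e.modify "count" 0 (· + 1)) else d2) := by
      rw [pvStepA, pvE00]
      rfl
    rw [hfold, hstep, hka, hkf]
    by_cases hk : pvKeyOf f r ∈ pvKa f rs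
    · have hc : (pvInnerA ids f rs).contains (pvKeyOf f r) = true := by rw [hcont]; simp [hk]
      have hgk : (pvInnerA ids f rs).getD (pvKeyOf f r) PySem.Dict.empty =
          pvEntry (((pvKa f rs).count (pvKeyOf f r) : Nat) : Int) (((pvKf ids f rs).count (pvKeyOf f r) : Nat) : Int) := by
        rw [ihg (pvKeyOf f r), if_pos hk]
      constructor
      · show (pvStepCore (pvInnerA ids f rs) (pvKeyOf f r) (pvInF ids r)).keys = _
        rw [pvStepCore_keys_of_contains _ _ _ hc, ihk, pvOfList_append_mem hk]
      · intro v
        by_cases hv : v = pvKeyOf f r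
        · subst hv
          by_cases hp : pvInF ids r <;>
            simp [hp, hc, PySem.Dict.getD_modify, hgk, pvEntry_modify_total, pvEntry_modify_count,
                  hk, List.count_append] <;>
            push_cast <;> ring_nf <;> simp
        · by_cases hp : pvInF ids r <;>
            simp [hp, hc, PySem.Dict.getD_modify, hv, ihg v, List.count_append,
                  List.count_cons, (by simpa using (Ne.symm hv) : ¬ pvKeyOf f r = v)] <;>
            by_cases hvin : v ∈ pvKa f rs <;> simp [hvin]
    · have hc : (pvInnerA ids f rs).contains (pvKeyOf f r) = false := by rw [hcont]; simp [hk]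
      have hkf0 : (pvKf ids f rs).count (pvKeyOf f r) = 0 :=
        List.count_eq_zero.2 (fun h => hk (pvKf_subset ids f rs h))
      have hka0 : (pvKa f rs).count (pvKeyOf f r) = 0 := List.count_eq_zero.2 hk
      constructor
      · show (pvStepCore (pvInnerA ids f rs) (pvKeyOf f r) (pvInF ids r)).keys = _
        rw [pvStepCore_keys_of_not_contains _ _ _ hc, ihk, pvOfList_append_not_mem hk]
      · intro v
        by_cases hv : v = pvKeyOf f r
        · subst hv
          by_cases hp : pvInF ids r <;>
            simp [hp, hc, PySem.Dict.getD_modify, PySem.Dict.getD_insert, pvEntry_modify_total,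
                  pvEntry_modify_count, List.count_append, hka0, hkf0]
        · by_cases hp : pvInF ids r <;>
            simp [hp, hc, PySem.Dict.getD_modify, PySem.Dict.getD_insert, hv, ihg v,
                  List.count_append, List.count_cons, (by simpa using (Ne.symm hv) : ¬ pvKeyOf f r = v)] <;>
            by_cases hvin : v ∈ pvKa f rs <;> simp [hvin]

theorem pvInnerA_items (ids : PySem.Set (Option String)) (f : String) (rs : List (List (String × String))) :
    (pvInnerA ids f rs).items.map (fun q => (q.1, q.2.items)) = pvCanon ids rs f := by
  obtain ⟨hkeys, hgetD⟩ := pvInnerA_inv ids f rs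
  have hnd : (pvInnerA ids f rs).keys.Nodup := by rw [hkeys]; exact PySem.Set.nodup_ofList _
  rw [PySem.Dict.items_eq_map_keys _ hnd PySem.Dict.empty, hkeys, List.map_map, pvCanon]
  apply List.map_congr_left
  intro v hv
  have hvk : v ∈ pvKa f rs := (PySem.Set.mem_ofList _ _).1 hv
  simp only [Function.comp, hgetD v, if_pos hvk, pvEntry]

theorem pvProc_getD (ids : PySem.Set (Option String)) (r : List (String × String))
    (fs : List String) (hnd : fs.Nodup) (pc : PySem.Dict String (PySem.Dict String (PySem.Dict String Int))) (v : String) :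
    (fs.foldl (fun pc f => pc.insert f (pvStepA ids f (pc.getD f PySem.Dict.empty) r)) pc).getD v PySem.Dict.empty =
      if v ∈ fs then pvStepA ids v (pc.getD v PySem.Dict.empty) r else pc.getD v PySem.Dict.empty := by
  induction fs generalizing pc with
  | nil => simp
  | cons f0 fs ih =>
    obtain ⟨hf0, hnd'⟩ := List.nodup_cons.1 hnd
    rw [List.foldl_cons, ih hnd']
    by_cases hv : v ∈ fs
    · have hne : v ≠ f0 := fun h => hf0 (h ▸ hv)
      simp [hv, PySem.Dict.getD_insert, hne]
    · by_cases hvf : v = f0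
      · subst hvf
        simp [hv, PySem.Dict.getD_insert]
      · simp [hv, hvf, PySem.Dict.getD_insert]

theorem pvOuter_inv (ids : PySem.Set (Option String)) (rs : List (List (String × String))) :
    (rs.foldl (fun pc report =>
      pvPaneFields.foldl (fun pc f =>
        pc.insert f (pvStepA ids f (pc.getD f PySem.Dict.empty) report)) pc)
      (pvPaneFields.foldl (fun pc f => pc.insert f PySem.Dict.empty)
        (PySem.Dict.empty : PySem.Dict String (PySem.Dict String (PySem.Dict String Int))))).keys = pvPaneFields ∧
    ∀ f, f ∈ pvPaneFields →
      (rs.foldl (fun pc report =>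
        pvPaneFields.foldl (fun pc f =>
          pc.insert f (pvStepA ids f (pc.getD f PySem.Dict.empty) report)) pc)
        (pvPaneFields.foldl (fun pc f => pc.insert f PySem.Dict.empty)
          (PySem.Dict.empty : PySem.Dict String (PySem.Dict String (PySem.Dict String Int))))).getD f PySem.Dict.empty
        = pvInnerA ids f rs := by
  induction rs using List.reverseRecOn with
  | nil =>
    refine ⟨by rw [List.foldl_nil]; decide, fun f hf => ?_⟩
    have hf' : f = "ip" ∨ f = "country" ∨ f = "method" ∨ f = "url" ∨ f = "status" ∨
        f = "reason" ∨ f = "server_name" ∨ f = "security_mode" := by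
      simpa [pvPaneFields] using hf
    have he : pvInnerA ids f [] = PySem.Dict.empty := rfl
    rw [List.foldl_nil, he]
    rcases hf' with rfl | rfl | rfl | rfl | rfl | rfl | rfl | rfl <;> decide
  | append_singleton rs r ih =>
    obtain ⟨ihk, ihg⟩ := ih
    rw [List.foldl_append, List.foldl_cons, List.foldl_nil]
    constructor
    · rw [PySem.Dict.keys_foldl_insert, ihk]
      decide
    · intro f hf
      rw [pvProc_getD ids r pvPaneFields (by decide), if_pos hf, ihg f hf]
      simp [pvInnerA, List.foldl_append]

theorem pvAlt_eq_canon (all_reports filtered_reports : List (List (String × String))) :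
    calculate_pane_counts_py_alt all_reports filtered_reports =
      pvPaneFields.map (fun f => (f, pvCanon (pvFilteredIds filtered_reports) all_reports f)) := by
  unfold calculate_pane_counts_py_alt
  apply List.map_congr_left
  intro f _
  dsimp only
  rw [PySem.Dict.items_counter, List.map_map]
  refine congrArg (Prod.mk f) ?_
  unfold pvCanon
  apply List.map_congr_left
  intro v _
  dsimp only [Function.comp]
  rw [PySem.Dict.getD_counter]
  rfl

theorem pvItems_of (d : PySem.Dict String (PySem.Dict String (PySem.Dict String Int)))
    (g : String → PySem.Dict String (PySem.Dict String Int))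
    (hk : d.keys = pvPaneFields) (hg : ∀ f ∈ pvPaneFields, d.getD f PySem.Dict.empty = g f) :
    d.items = pvPaneFields.map (fun f => (f, g f)) := by
  rw [PySem.Dict.items_eq_map_keys d (by rw [hk]; decide) PySem.Dict.empty, hk]
  exact List.map_congr_left (fun f hf => by rw [hg f hf])

-- ===== VERDICT (by name: the statement is the Claim_ definition above) =====
theorem calculate_pane_counts_py_spec : Claim_equal_calculate_pane_counts_py := by
  intro all_reports filtered_reports _
  unfold Spec_calculate_pane_counts_py
  rw [pvAlt_eq_canon]
  unfold calculate_pane_counts_py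
  dsimp only
  obtain ⟨hkeys, hgetD⟩ := pvOuter_inv (pvFilteredIds filtered_reports) all_reports
  rw [pvItems_of _ (fun f => pvInnerA (pvFilteredIds filtered_reports) f all_reports) hkeys hgetD,
      List.map_map]
  apply List.map_congr_left
  intro f hf
  dsimp only [Function.comp]
  rw [pvInnerA_items]
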